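-- pv_equiv track=rewrite | github.com/GhostNaN/ReVidia-Audio-Visualizer | ReVidia_win.py | interpData
-- ===== SOURCE A (Python) =====
-- def interpData(barValues, oldList):
--     interpBarValues = barValues
--
--     if len(oldList[0]) == len(barValues):
--         for oldValues in oldList:
--             barValues = list(map(lambda new, old: new + old, barValues, oldValues))
--         divide = len(oldList) + 1
--         interpBarValues = list(map(lambda bars: bars // divide, barValues))
--
--     return interpBarValues
-- ===== SOURCE B (Python) =====
-- def interpData(barValues, oldList):
--     if len(oldList[0]) == len(barValues):
--         divide = len(oldList) + 1
--         return [(b + sum(col)) // divide for b, col in zip(barValues, zip(*oldList))]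
--     return barValues
-- ===== Notes on version B (the rewrite author's own statement) =====
-- stated objective: idiomatic
-- what changed: B replaces A's outer loop over oldList (which rebuilds barValues once per old list) with a single column-wise comprehension over the transposed oldList, summing each column once.
import Mathlib
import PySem

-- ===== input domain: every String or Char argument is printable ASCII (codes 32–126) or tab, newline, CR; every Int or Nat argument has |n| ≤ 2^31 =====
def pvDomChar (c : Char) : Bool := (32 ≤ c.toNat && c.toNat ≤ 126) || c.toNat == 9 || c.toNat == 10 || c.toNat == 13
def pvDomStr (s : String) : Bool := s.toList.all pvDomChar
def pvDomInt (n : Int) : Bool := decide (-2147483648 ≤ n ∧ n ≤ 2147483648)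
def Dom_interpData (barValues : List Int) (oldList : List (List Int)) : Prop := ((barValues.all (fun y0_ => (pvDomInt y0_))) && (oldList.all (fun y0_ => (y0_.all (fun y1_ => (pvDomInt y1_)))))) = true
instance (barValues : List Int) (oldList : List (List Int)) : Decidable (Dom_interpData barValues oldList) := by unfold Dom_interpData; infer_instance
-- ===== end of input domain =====

-- B blends column-wise over the transposed oldList instead of A's outer loop over the lists; idiomatic rewrite, same cost.

-- ===== PORT A =====
def interpData (barValues : List Int) (oldList : List (List Int)) : List Int :=
  match oldList with
  | [] => []   -- unreachable under Pre_: Python A raises IndexError on oldList[0]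
  | first :: _ =>
    if first.length == barValues.length then
      -- for oldValues in oldList: barValues = list(map(lambda new, old: new + old, barValues, oldValues))
      let summed := oldList.foldl (fun acc old => List.zipWith (fun n o => n + o) acc old) barValues
      let divide : Int := (oldList.length : Int) + 1
      summed.map (fun b => PySem.Int.floordiv b divide)
    else
      barValues

-- ===== PORT B =====
-- zip(*ls) for a list of lists (truncates to the shortest list, like Python's zip)
def zipStar (ls : List (List Int)) : List (List Int) :=
  match ls with
  | [] => []
  | [l] => l.map (fun x => [x])
  | l :: rest => List.zipWith (fun x c => x :: c) l (zipStar rest)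

def interpData_alt (barValues : List Int) (oldList : List (List Int)) : List Int :=
  match oldList with
  | [] => []   -- unreachable under Pre_: Python B raises IndexError on oldList[0]
  | first :: _ =>
    if first.length == barValues.length then
      let divide : Int := (oldList.length : Int) + 1
      List.zipWith (fun b col => PySem.Int.floordiv (b + col.sum) divide) barValues (zipStar oldList)
    else
      barValues

-- ===== PRECONDITION & SPEC =====
-- Pre_ excludes only oldList = [], where both A and B raise IndexError on oldList[0].
def Pre_interpData (barValues : List Int) (oldList : List (List Int)) : Prop := oldList ≠ []
instance (barValues : List Int) (oldList : List (List Int)) : Decidable (Pre_interpData barValues oldList) := by unfold Pre_interpData; infer_instance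
def pvWitness_interpData : List Int × List (List Int) := ([10, 20], [[2, 4], [6, 8]])

def Spec_interpData (barValues : List Int) (oldList : List (List Int)) (out : List Int) : Prop := out = interpData_alt barValues oldList
instance (barValues : List Int) (oldList : List (List Int)) (out : List Int) : Decidable (Spec_interpData barValues oldList out) := by unfold Spec_interpData; infer_instance

-- ===== CLAIM (what is proved, stated in full; the proofs are below) =====
def Claim_equal_interpData : Prop := ∀ (barValues : List Int) (oldList : List (List Int)), Dom_interpData barValues oldList → Pre_interpData barValues oldList → Spec_interpData barValues oldList (interpData barValues oldList)

-- ===== LEMMAS AND PROOFS =====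

-- pushing a zipWith (+) into the column-sum zipWith
lemma zip_assoc (a l : List Int) (cs : List (List Int)) :
    List.zipWith (fun b col => b + List.sum col) (List.zipWith (fun n o => n + o) a l) cs
    = List.zipWith (fun b col => b + List.sum col) a (List.zipWith (fun x c => x :: c) l cs) := by
  induction a generalizing l cs with
  | nil => simp
  | cons x xs ih =>
    cases l with
    | nil => simp
    | cons y ys =>
      cases cs with
      | nil => simp
      | cons c cstl => simp [ih]; ring

-- A's fold over a nonempty oldList equals B's column-wise blend
lemma fold_eq_cols (l : List Int) (rest : List (List Int)) (acc : List Int) :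
    (l :: rest).foldl (fun acc old => List.zipWith (fun n o => n + o) acc old) acc
    = List.zipWith (fun b col => b + List.sum col) acc (zipStar (l :: rest)) := by
  induction rest generalizing l acc with
  | nil =>
    simp [zipStar, List.zipWith_map_right]
  | cons l2 tl ih =>
    show (l2 :: tl).foldl _ (List.zipWith (fun n o => n + o) acc l) = _
    rw [ih l2 (List.zipWith (fun n o => n + o) acc l)]
    rw [zip_assoc]
    rfl

-- ===== VERDICT (by name: the statement is the Claim_ definition above) =====
theorem interpData_spec : Claim_equal_interpData := by
  intro barValues oldList _ hpre
  unfold Spec_interpData interpData interpData_alt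
  cases oldList with
  | nil => exact absurd rfl hpre
  | cons first rest =>
    by_cases h : first.length == barValues.length
    · simp only [h, if_pos]
      rw [fold_eq_cols]
      rw [List.map_zipWith]
    · simp [h]
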